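-- pv_equiv track=rewrite | github.com/progremming/baekjoon | 프로그래머스/1/133499. 옹알이 （2）/옹알이 （2）.py | solution
-- ===== SOURCE A (Python) =====
-- def solution(babbling):
--     a = ["aya", "ye", "woo", "ma"]
--     count = 0
--     c = ""
--     for i in babbling:
--         while True:
--             for x in a:
--                 if c == x:
--                     pass
--                 elif i[:len(x)] == x:
--
--                     i = i[len(x):]
--                     c = x
--                     break
--             else:
--                 break
--
--         if i == "":
--             count += 1
--         c= ""
--     return count
-- ===== SOURCE B (Python) =====
-- def solution(babbling):
--     WORDS = ("aya", "ye", "woo", "ma")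
--
--     def tokens(s):
--         # greedily split s into allowed words (unique since no word is a
--         # prefix of another); None if s cannot be split
--         out = []
--         while s:
--             for w in WORDS:
--                 if s.startswith(w):
--                     out.append(w)
--                     s = s[len(w):]
--                     break
--             else:
--                 return None
--         return out
--
--     count = 0
--     for s in babbling:
--         t = tokens(s)
--         if t is not None and all(x != y for x, y in zip(t, t[1:])):
--             count += 1
--     return count
-- ===== Notes on version B (the rewrite author's own statement) =====
-- stated objective: alternative
-- what changed: Replaces A's single stateful greedy scan (mutable leftover string plus a 'previous word' register consulted inside the word loop) by a two-phase pipeline: first tokenize each string into its unique greedy word decomposition, then separately check that no two adjacent tokens are equal.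
import Mathlib
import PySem

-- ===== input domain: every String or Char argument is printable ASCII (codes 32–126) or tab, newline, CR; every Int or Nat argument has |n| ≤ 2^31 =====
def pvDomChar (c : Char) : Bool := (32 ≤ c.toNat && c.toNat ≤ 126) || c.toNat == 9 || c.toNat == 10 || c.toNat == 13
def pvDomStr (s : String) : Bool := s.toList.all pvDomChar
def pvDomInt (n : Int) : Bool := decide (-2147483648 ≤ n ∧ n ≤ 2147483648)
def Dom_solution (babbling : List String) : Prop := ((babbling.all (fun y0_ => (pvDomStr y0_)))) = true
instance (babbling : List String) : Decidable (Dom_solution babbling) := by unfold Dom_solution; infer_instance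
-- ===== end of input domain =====

-- B re-implements A's stateful greedy scan as a two-phase tokenize-then-check (alternative
-- decomposition, same cost); both return the same count on every input.

-- ===== PORT A =====
-- the allowed words, as lists of code points
def pvWords : List (List Char) := [['a','y','a'], ['y','e'], ['w','o','o'], ['m','a']]

-- A's inner "for x in a … else: break": first word x with c ≠ x that is a prefix of i
-- (i[:len(x)] == x, i[len(x):] ported via PySem.List.slice); 'some (i', x)' = the 'break' case
def pvTryA : List (List Char) → List Char → List Char → Option (List Char × List Char)
  | [], _, _ => none
  | x :: rest, i, c =>
    if c = x then pvTryA rest i c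
    else if PySem.List.slice i none (some (x.length : Int)) = x then
      some (PySem.List.slice i (some (x.length : Int)) none, x)
    else pvTryA rest i c

-- termination measure for the 'while True' loop (needed by pvLoopA's decreasing_by)
lemma pvTryA_length : ∀ (ws : List (List Char)) i c i' x, (∀ w ∈ ws, w ≠ ([] : List Char)) →
    pvTryA ws i c = some (i', x) → i'.length < i.length := by
  intro ws
  induction ws with
  | nil => intro i c i' x _ h; simp [pvTryA] at h
  | cons w rest ih =>
    intro i c i' x hne h
    simp only [pvTryA] at h
    split_ifs at h with h1 h2
    · exact ih i c i' x (fun v hv => hne v (List.mem_cons_of_mem _ hv)) h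
    · rw [PySem.List.slice_to_natCast] at h2
      rw [PySem.List.slice_from_natCast] at h
      simp only [Option.some.injEq, Prod.mk.injEq] at h
      obtain ⟨hi, hx⟩ := h
      subst hi
      have hw : w ≠ [] := hne w List.mem_cons_self
      have hlen : w.length ≤ i.length := by
        have := congrArg List.length h2
        simp at this; omega
      have hwpos : 0 < w.length := List.length_pos_iff.mpr hw
      simp only [List.length_drop]
      omega
    · exact ih i c i' x (fun v hv => hne v (List.mem_cons_of_mem _ hv)) h

-- A's 'while True' loop: returns the leftover of i
def pvLoopA (i c : List Char) : List Char :=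
  match h : pvTryA pvWords i c with
  | some (i', x) => pvLoopA i' x
  | none => i
termination_by i.length
decreasing_by exact pvTryA_length pvWords i c _ _ (by decide) h

def solution (babbling : List String) : Int :=
  babbling.foldl (fun count i => if pvLoopA i.toList [] = [] then count + 1 else count) 0

-- ===== PORT B =====
-- B's "for w in WORDS: if s.startswith(w): … else: return None": first word prefixing s
def pvFindB : List (List Char) → List Char → Option (List Char)
  | [], _ => none
  | w :: rest, s => if PySem.Chars.startswith s w then some w else pvFindB rest s

lemma pvFindB_spec : ∀ (ws : List (List Char)) s w, pvFindB ws s = some w →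
    w ∈ ws ∧ w <+: s := by
  intro ws
  induction ws with
  | nil => intro s w h; simp [pvFindB] at h
  | cons v rest ih =>
    intro s w h
    simp only [pvFindB] at h
    split_ifs at h with h1
    · cases h
      exact ⟨List.mem_cons_self, (PySem.Chars.startswith_iff _ _).mp h1⟩
    · obtain ⟨hm, hp⟩ := ih s w h
      exact ⟨List.mem_cons_of_mem _ hm, hp⟩

-- B's 'while s:' tokenizer: the greedy word decomposition of s, or none
def pvTokens (s : List Char) : Option (List (List Char)) :=
  if hs : s = [] then some []
  else
    match h : pvFindB pvWords s with
    | some w => (pvTokens (s.drop w.length)).map (fun ts => w :: ts)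
    | none => none
termination_by s.length
decreasing_by
  obtain ⟨hm, hp⟩ := pvFindB_spec pvWords s w h
  have hw : 0 < w.length := by
    simp [pvWords] at hm
    rcases hm with rfl | rfl | rfl | rfl <;> simp
  have hle := hp.length_le
  simp only [List.length_drop]
  omega

-- B's "all(x != y for x, y in zip(t, t[1:]))"
def pvNoAdj : List (List Char) → Bool
  | x :: y :: r => if x = y then false else pvNoAdj (y :: r)
  | _ => true

def solution_alt (babbling : List String) : Int :=
  babbling.foldl (fun count s =>
    match pvTokens s.toList with
    | some ts => if pvNoAdj ts then count + 1 else count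
    | none => count) 0

-- ===== PRECONDITION & SPEC =====
def Spec_solution (babbling : List String) (out : Int) : Prop := out = solution_alt babbling
instance (babbling : List String) (out : Int) : Decidable (Spec_solution babbling out) := by unfold Spec_solution; infer_instance

-- ===== CLAIM (what is proved, stated in full; the proofs are below) =====
def Claim_equal_solution : Prop := ∀ (babbling : List String), Dom_solution babbling → Spec_solution babbling (solution babbling)

-- ===== LEMMAS AND PROOFS =====

-- the four words are pairwise non-prefix (distinct first letters), so at most one matches
lemma pvNoNil : ∀ w ∈ pvWords, w ≠ ([] : List Char) := by decide

lemma pvTake_iff (i w : List Char) : (List.take w.length i = w) ↔ w <+: i :=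
  ⟨fun h => List.prefix_iff_eq_take.mpr h.symm, fun h => (List.prefix_iff_eq_take.mp h).symm⟩

-- one unfolding step of A's while-loop (plain, non-dependent match)
lemma pvLoopA_eq (i c : List Char) :
    pvLoopA i c = (match pvTryA pvWords i c with
      | some p => pvLoopA p.1 p.2
      | none => i) := by
  rw [pvLoopA]
  split <;> rename_i heq <;> rw [heq]

-- A's word-scan (with the c-skip) expressed through B's word-finder: the match is unique
lemma pvTryA_eq (i c : List Char) :
    pvTryA pvWords i c = (match pvFindB pvWords i with
      | some w => if w = c then none else some (i.drop w.length, w)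
      | none => none) := by
  by_cases p1 : ['a','y','a'] <+: i <;>
  by_cases p2 : ['y','e'] <+: i <;>
  by_cases p3 : ['w','o','o'] <+: i <;>
  by_cases p4 : ['m','a'] <+: i <;>
  first
  | (exfalso
     first
     | (rcases List.prefix_or_prefix_of_prefix p1 p2 with h | h <;> revert h <;> decide)
     | (rcases List.prefix_or_prefix_of_prefix p1 p3 with h | h <;> revert h <;> decide)
     | (rcases List.prefix_or_prefix_of_prefix p1 p4 with h | h <;> revert h <;> decide)
     | (rcases List.prefix_or_prefix_of_prefix p2 p3 with h | h <;> revert h <;> decide)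
     | (rcases List.prefix_or_prefix_of_prefix p2 p4 with h | h <;> revert h <;> decide)
     | (rcases List.prefix_or_prefix_of_prefix p3 p4 with h | h <;> revert h <;> decide))
  | ((simp only [pvTryA, pvFindB, pvWords, PySem.List.slice_to_natCast,
        PySem.List.slice_from_natCast, PySem.Chars.startswith_iff, pvTake_iff,
        p1, p2, p3, p4, if_false, ite_self]) <;>
     simp [eq_comm])

-- every token produced by B's tokenizer is one of the allowed words
lemma pvTokens_mem : ∀ (n : Nat) (s : List Char), s.length ≤ n →
    ∀ ts, pvTokens s = some ts → ∀ t ∈ ts, t ∈ pvWords := by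
  intro n
  induction n with
  | zero =>
    intro s hs ts h t ht
    have hsnil : s = [] := List.eq_nil_of_length_eq_zero (by omega)
    subst hsnil
    simp [pvTokens] at h
    subst h
    simp at ht
  | succ n ih =>
    intro s hs ts h t ht
    rw [pvTokens] at h
    by_cases hnil : s = []
    · simp [hnil] at h
      subst h
      simp at ht
    · simp only [hnil, dite_false] at h
      cases hf : pvFindB pvWords s with
      | none => rw [hf] at h; simp at h
      | some w =>
        rw [hf] at h
        obtain ⟨hm, hp⟩ := pvFindB_spec pvWords s w hf
        obtain ⟨ts', hts', rfl⟩ := Option.map_eq_some_iff.mp h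
        rcases List.mem_cons.mp ht with rfl | ht'
        · exact hm
        · have hw : w ≠ [] := pvNoNil w hm
          have hwpos : 0 < w.length := List.length_pos_iff.mpr hw
          have hle := hp.length_le
          have hsl : 0 < s.length := List.length_pos_iff.mpr hnil
          exact ih (s.drop w.length) (by simp [List.length_drop]; omega) ts' hts' t ht'

-- the heart: A's leftover is empty iff B tokenizes fully with no adjacent repeat (prev word c)
lemma pvMain : ∀ (n : Nat) (i c : List Char), i.length ≤ n →
    ((pvLoopA i c = []) ↔ ∃ ts, pvTokens i = some ts ∧ pvNoAdj (c :: ts) = true) := by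
  intro n
  induction n with
  | zero =>
    intro i c hi
    have hn : i = [] := List.eq_nil_of_length_eq_zero (by omega)
    subst hn
    rw [pvLoopA_eq, pvTryA_eq]
    have hnone : pvFindB pvWords [] = none := by decide
    rw [hnone]
    simp [pvTokens, pvNoAdj]
  | succ n ih =>
    intro i c hi
    by_cases hnil : i = []
    · subst hnil
      rw [pvLoopA_eq, pvTryA_eq]
      have hnone : pvFindB pvWords [] = none := by decide
      rw [hnone]
      simp [pvTokens, pvNoAdj]
    · rw [pvLoopA_eq, pvTryA_eq, pvTokens]
      simp only [hnil, dite_false]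
      cases hf : pvFindB pvWords i with
      | none => simp [hnil]
      | some w =>
        obtain ⟨hm, hp⟩ := pvFindB_spec pvWords i w hf
        have hw : w ≠ [] := pvNoNil w hm
        have hwpos : 0 < w.length := List.length_pos_iff.mpr hw
        have hle := hp.length_le
        have hil : 0 < i.length := List.length_pos_iff.mpr hnil
        by_cases hc : w = c
        · subst hc
          simp only [reduceIte]
          constructor
          · intro h; exact absurd h hnil
          · rintro ⟨ts, hts, hadj⟩
            obtain ⟨ts', _, rfl⟩ := Option.map_eq_some_iff.mp hts
            simp [pvNoAdj] at hadj
        · simp only [if_neg hc]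
          have hrec := ih (i.drop w.length) w (by simp [List.length_drop]; omega)
          rw [hrec]
          constructor
          · rintro ⟨ts', hts', hadj⟩
            refine ⟨w :: ts', by rw [hts']; rfl, ?_⟩
            simpa [pvNoAdj, Ne.symm hc] using hadj
          · rintro ⟨ts, hts, hadj⟩
            obtain ⟨ts', hts', rfl⟩ := Option.map_eq_some_iff.mp hts
            refine ⟨ts', hts', ?_⟩
            simpa [pvNoAdj, Ne.symm hc] using hadj

-- the two per-string judgements coincide (c starts at "")
lemma pvStep_eq (count : Int) (s : String) :
    (if pvLoopA s.toList [] = [] then count + 1 else count) =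
      (match pvTokens s.toList with
        | some ts => if pvNoAdj ts then count + 1 else count
        | none => count) := by
  have hmain := pvMain s.toList.length s.toList [] le_rfl
  cases hT : pvTokens s.toList with
  | none =>
    rw [hT] at hmain
    simp only [hmain]
    simp
  | some ts =>
    rw [hT] at hmain
    have hadj : pvNoAdj (([] : List Char) :: ts) = pvNoAdj ts := by
      cases ts with
      | nil => rfl
      | cons t r =>
        have ht : t ∈ pvWords :=
          pvTokens_mem s.toList.length s.toList le_rfl (t :: r) hT t List.mem_cons_self
        have : ([] : List Char) ≠ t := (pvNoNil t ht).symm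
        simp [pvNoAdj, this]
    by_cases hA : pvNoAdj ts
    · have : pvLoopA s.toList [] = [] := hmain.mpr ⟨ts, rfl, by rw [hadj]; exact hA⟩
      simp [this, hA]
    · have : ¬ pvLoopA s.toList [] = [] := by
        rw [hmain]
        rintro ⟨ts₂, hts₂, hadj₂⟩
        obtain rfl : ts = ts₂ := by injection hts₂
        rw [hadj] at hadj₂
        exact hA hadj₂
      simp [this, hA]

lemma pvFoldl_eq : ∀ (l : List String) (acc : Int),
    l.foldl (fun count i => if pvLoopA i.toList [] = [] then count + 1 else count) acc =
      l.foldl (fun count s =>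
        match pvTokens s.toList with
        | some ts => if pvNoAdj ts then count + 1 else count
        | none => count) acc := by
  intro l
  induction l with
  | nil => intro acc; rfl
  | cons s rest ih =>
    intro acc
    simp only [List.foldl_cons]
    rw [pvStep_eq acc s]
    exact ih _

-- ===== VERDICT (by name: the statement is the Claim_ definition above) =====
theorem solution_spec : Claim_equal_solution := by
  intro babbling _
  unfold Spec_solution solution solution_alt
  exact pvFoldl_eq babbling 0
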